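-- pv_equiv track=rewrite | github.com/DengShunChen/firewallTool | src/firewall_tool/formatters.py | parse_active_zones
-- ===== SOURCE A (Python) =====
-- from typing import Iterable, List, Optional, Sequence, Tuple
--
-- def parse_active_zones(text: str) -> List[Tuple[str, str]]:
--     """Parse `firewall-cmd --get-active-zones` into (zone, details) rows."""
--     rows: List[Tuple[str, str]] = []
--     current_zone: Optional[str] = None
--     buf: List[str] = []
--     for raw in text.splitlines():
--         line = raw.rstrip()
--         if not line.strip():
--             continue
--         if not line.startswith(" "):
--             if current_zone is not None:
--                 rows.append((current_zone, "\n".join(buf).strip()))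
--             current_zone = line.split()[0].rstrip(":")
--             buf = []
--         else:
--             buf.append(line.strip())
--     if current_zone is not None:
--         rows.append((current_zone, "\n".join(buf).strip()))
--     return rows
-- ===== SOURCE B (Python) =====
-- from typing import List, Tuple
--
-- def parse_active_zones(text: str) -> List[Tuple[str, str]]:
--     """Parse `firewall-cmd --get-active-zones` into (zone, details) rows."""
--     # pass 1: group the significant lines into blocks, each headed by a
--     # non-indented line; indented lines before any header are dropped
--     blocks: List[List[str]] = []
--     for raw in text.splitlines():
--         line = raw.rstrip()
--         if not line.strip():
--             continue
--         if not line.startswith(" "):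
--             blocks.append([line])
--         elif blocks:
--             blocks[-1].append(line)
--     # pass 2: turn each block into a (zone, details) row
--     return [
--         (b[0].split()[0].rstrip(":"),
--          "\n".join(x.strip() for x in b[1:]).strip())
--         for b in blocks
--     ]
-- ===== Notes on version B (the rewrite author's own statement) =====
-- stated objective: alternative
-- what changed: Replaces A's single flush-on-boundary pass with running (current_zone, buf) state by two distinct passes: first group lines into header-led blocks, then map each block to its (zone, details) row.
import Mathlib
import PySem

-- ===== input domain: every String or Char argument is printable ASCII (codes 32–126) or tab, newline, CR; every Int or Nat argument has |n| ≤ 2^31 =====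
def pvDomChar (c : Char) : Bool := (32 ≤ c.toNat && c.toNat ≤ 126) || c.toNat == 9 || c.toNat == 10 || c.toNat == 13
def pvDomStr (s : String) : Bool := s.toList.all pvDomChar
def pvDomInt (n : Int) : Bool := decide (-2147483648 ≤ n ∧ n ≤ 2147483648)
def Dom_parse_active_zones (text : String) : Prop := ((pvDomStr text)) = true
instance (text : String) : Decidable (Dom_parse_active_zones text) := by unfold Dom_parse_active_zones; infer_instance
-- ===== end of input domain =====

-- B replaces A's flush-on-boundary single pass by two distinct passes (group into blocks, then map each block to a row); same cost, alternative decomposition.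

-- ===== PORT A =====
-- hand port of s.rstrip(":") for the literal chars ":" — exact: drops exactly the trailing ':' characters
def pazRstripColon (s : String) : String :=
  String.ofList ((s.toList.reverse.dropWhile (· = ':')).reverse)

-- one iteration of A's loop over splitlines, state = (rows, current_zone, buf)
def pazStepA (st : List (String × String) × Option String × List String) (raw : String) :
    List (String × String) × Option String × List String :=
  let line := PySem.Str.rstrip raw
  if PySem.Str.strip line = "" then st
  else if PySem.Str.startswith line " " = false then
    let rows := match st.2.1 with
      | some z => st.1 ++ [(z, PySem.Str.strip (PySem.Str.join "\n" st.2.2))]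
      | none => st.1
    -- line.split()[0] : line is known non-blank here, so split₀ is nonempty; headD is its [0]
    (rows, some (pazRstripColon ((PySem.Str.split₀ line).headD "")), [])
  else
    (st.1, st.2.1, st.2.2 ++ [PySem.Str.strip line])

def parse_active_zones (text : String) : List (String × String) :=
  let st := (PySem.Str.splitlines text).foldl pazStepA ([], none, [])
  match st.2.1 with
  | some z => st.1 ++ [(z, PySem.Str.strip (PySem.Str.join "\n" st.2.2))]
  | none => st.1

-- ===== PORT B =====
-- blocks[-1].append(line) guarded by `elif blocks:` — no-op on the empty block list
def pazAppendLast (blocks : List (List String)) (line : String) : List (List String) :=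
  match blocks with
  | [] => []
  | [b] => [b ++ [line]]
  | b :: rest => b :: pazAppendLast rest line

-- pass 1 body: group significant lines into header-led blocks
def pazStepB (blocks : List (List String)) (raw : String) : List (List String) :=
  let line := PySem.Str.rstrip raw
  if PySem.Str.strip line = "" then blocks
  else if PySem.Str.startswith line " " = false then blocks ++ [[line]]
  else pazAppendLast blocks line

-- pass 2 body: one block → one (zone, details) row
def pazRow (b : List String) : String × String :=
  (pazRstripColon ((PySem.Str.split₀ (b.headD "")).headD ""),
   PySem.Str.strip (PySem.Str.join "\n" ((b.drop 1).map PySem.Str.strip)))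

def parse_active_zones_alt (text : String) : List (String × String) :=
  (((PySem.Str.splitlines text).foldl pazStepB []).map pazRow)

-- ===== PRECONDITION & SPEC =====
def Spec_parse_active_zones (text : String) (out : List (String × String)) : Prop := out = parse_active_zones_alt text
instance (text : String) (out : List (String × String)) : Decidable (Spec_parse_active_zones text out) := by unfold Spec_parse_active_zones; infer_instance

-- ===== CLAIM (what is proved, stated in full; the proofs are below) =====
def Claim_equal_parse_active_zones : Prop := ∀ (text : String), Dom_parse_active_zones text → Spec_parse_active_zones text (parse_active_zones text)

-- ===== LEMMAS AND PROOFS =====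

-- A's final flush
def pazFinish (st : List (String × String) × Option String × List String) : List (String × String) :=
  match st.2.1 with
  | some z => st.1 ++ [(z, PySem.Str.strip (PySem.Str.join "\n" st.2.2))]
  | none => st.1

-- relation between A's loop state and B's block list
def pazRel (st : List (String × String) × Option String × List String)
    (blocks : List (List String)) : Prop :=
  (blocks = [] ∧ st.1 = [] ∧ st.2.1 = none) ∨
  (∃ bs b, blocks = bs ++ [b] ∧
     st = (bs.map pazRow, some ((pazRow b).1), (b.drop 1).map PySem.Str.strip))

theorem pazAppendLast_concat (bs : List (List String)) (b : List String) (line : String) :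
    pazAppendLast (bs ++ [b]) line = bs ++ [b ++ [line]] := by
  induction bs with
  | nil => rfl
  | cons x xs ih =>
    cases xs with
    | nil => simp [pazAppendLast]
    | cons y ys => simpa [pazAppendLast] using ih

theorem pazAppendLast_ne (blocks : List (List String)) (line : String)
    (hne : ∀ x ∈ blocks, x ≠ []) : ∀ x ∈ pazAppendLast blocks line, x ≠ [] := by
  induction blocks with
  | nil => simp [pazAppendLast]
  | cons b rest ih =>
    cases rest with
    | nil =>
      intro x hx
      simp [pazAppendLast] at hx
      simp [hx]
    | cons c cs =>
      intro x hx
      simp only [pazAppendLast, List.mem_cons] at hx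
      rcases hx with rfl | hx
      · exact hne x (by simp)
      · exact ih (fun y hy => hne y (by simp [hy])) x hx

theorem pazRel_finish (st : List (String × String) × Option String × List String)
    (blocks : List (List String)) (h : pazRel st blocks) :
    pazFinish st = blocks.map pazRow := by
  rcases h with ⟨h1, h2, h3⟩ | ⟨bs, b, rfl, rfl⟩
  · simp [pazFinish, h1, h2, h3]
  · simp [pazFinish, pazRow]

theorem pazRel_step (st : List (String × String) × Option String × List String)
    (blocks : List (List String)) (raw : String)
    (h : pazRel st blocks) (hne : ∀ x ∈ blocks, x ≠ []) :
    pazRel (pazStepA st raw) (pazStepB blocks raw) := by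
  unfold pazStepA pazStepB
  by_cases hblank : PySem.Str.strip (PySem.Str.rstrip raw) = ""
  · simpa [hblank] using h
  · by_cases hind : PySem.Chars.startswith (PySem.Chars.rstrip raw.toList) [' '] = false
    · -- header line: A flushes and starts a new zone, B opens a new block
      rcases h with ⟨h1, h2, h3⟩ | ⟨bs, b, rfl, rfl⟩
      · right
        refine ⟨[], [PySem.Str.rstrip raw], ?_, ?_⟩
        · simp [hblank, hind, h1]
        · obtain ⟨rows, cur, buf⟩ := st
          simp at h2 h3
          simp [hblank, hind, h2, h3, pazRow]
      · right
        exact ⟨bs ++ [b], [PySem.Str.rstrip raw], by simp [hblank, hind],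
          by simp [hblank, hind, pazRow]⟩
    · -- indented line: A buffers it, B appends to the last block
      simp only [Bool.not_eq_false] at hind
      rcases h with ⟨h1, h2, h3⟩ | ⟨bs, b, rfl, rfl⟩
      · left
        obtain ⟨rows, cur, buf⟩ := st
        simp at h2 h3
        simp [hblank, hind, h1, h2, h3, pazAppendLast]
      · right
        have hb : b ≠ [] := hne b (by simp)
        obtain ⟨hd, tl, rfl⟩ : ∃ hd tl, b = hd :: tl := by
          cases b with
          | nil => exact absurd rfl hb
          | cons hd tl => exact ⟨hd, tl, rfl⟩
        refine ⟨bs, (hd :: tl) ++ [PySem.Str.rstrip raw], ?_, ?_⟩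
        · simp [hblank, hind, pazAppendLast_concat]
        · simp [hblank, hind, pazRow]

theorem pazStepB_ne (blocks : List (List String)) (raw : String)
    (hne : ∀ x ∈ blocks, x ≠ []) : ∀ x ∈ pazStepB blocks raw, x ≠ [] := by
  unfold pazStepB
  intro x hx
  by_cases hblank : PySem.Str.strip (PySem.Str.rstrip raw) = ""
  · simp [hblank] at hx; exact hne x hx
  · by_cases hind : PySem.Chars.startswith (PySem.Chars.rstrip raw.toList) [' '] = false
    · simp [hblank, hind] at hx
      rcases hx with hx | rfl
      · exact hne x hx
      · simp
    · simp only [Bool.not_eq_false] at hind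
      simp [hblank, hind] at hx
      exact pazAppendLast_ne blocks _ hne x hx

theorem paz_main (lines : List String) :
    ∀ (st : List (String × String) × Option String × List String)
      (blocks : List (List String)), pazRel st blocks → (∀ x ∈ blocks, x ≠ []) →
      pazFinish (lines.foldl pazStepA st) = (lines.foldl pazStepB blocks).map pazRow := by
  induction lines with
  | nil => intro st blocks h _; simpa using pazRel_finish st blocks h
  | cons raw rest ih =>
    intro st blocks h hne
    simp only [List.foldl_cons]
    exact ih _ _ (pazRel_step st blocks raw h hne) (pazStepB_ne blocks raw hne)

-- ===== VERDICT (by name: the statement is the Claim_ definition above) =====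
theorem parse_active_zones_spec : Claim_equal_parse_active_zones := by
  intro text _
  unfold Spec_parse_active_zones parse_active_zones parse_active_zones_alt
  have := paz_main (PySem.Str.splitlines text) ([], none, []) []
    (Or.inl ⟨rfl, rfl, rfl⟩) (by simp)
  simpa [pazFinish] using this
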